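-- pv_equiv track=rewrite | github.com/GorVoskanyan/python_20_30 | 20_Practice/task_176.py | encode_nato
-- ===== SOURCE A (Python) =====
-- data = {
--     'A': 'Alpha', 'B': 'Bravo', 'C': 'Charlie', 'D': 'Delta',
--     'E': 'Echo', 'F': 'Foxtrot', 'G': 'Golf', 'H': 'Hotel',
--     'I': 'India', 'J': 'juliet', 'K': 'Kilo', 'L': 'Lima',
--     'M': 'Mike', 'N': 'November', 'O': 'Oscar', 'P': 'Papa',
--     'Q': 'Quebec', 'R': 'Romeo', 'S': 'Sierra', 'T': 'Tango',
--     'U': 'Uniform', 'V': 'Victor', 'W': 'Whiskey', 'X': 'Xray',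
--     'Y': 'Yankee', 'Z': 'Zulu'
-- }
--
-- def encode_nato(word):
--     if word == '':
--         return ''
--     word = word.upper()
--     char = word[0]
--     word = word[1:]
--     if not char.isalpha():
--         return encode_nato(word)
--     return data[char] + ' ' + encode_nato(word)
-- ===== SOURCE B (Python) =====
-- NATO = ('Alpha', 'Bravo', 'Charlie', 'Delta', 'Echo', 'Foxtrot', 'Golf',
--         'Hotel', 'India', 'juliet', 'Kilo', 'Lima', 'Mike', 'November',
--         'Oscar', 'Papa', 'Quebec', 'Romeo', 'Sierra', 'Tango', 'Uniform',
--         'Victor', 'Whiskey', 'Xray', 'Yankee', 'Zulu')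
--
-- def encode_nato(word):
--     parts = []
--     for c in word.upper():
--         if c.isalpha():
--             parts.append(NATO[ord(c) - 65] + ' ')
--     return ''.join(parts)
-- ===== Notes on version B (the rewrite author's own statement) =====
-- stated objective: faster
-- what changed: Replaces A's recursion (which re-uppercases and re-slices the remaining suffix on every call) with a single iterative pass that uppercases once and appends, per alphabetic character, the word looked up in a tuple indexed by ord(c)-65 instead of the dict.
import Mathlib
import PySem

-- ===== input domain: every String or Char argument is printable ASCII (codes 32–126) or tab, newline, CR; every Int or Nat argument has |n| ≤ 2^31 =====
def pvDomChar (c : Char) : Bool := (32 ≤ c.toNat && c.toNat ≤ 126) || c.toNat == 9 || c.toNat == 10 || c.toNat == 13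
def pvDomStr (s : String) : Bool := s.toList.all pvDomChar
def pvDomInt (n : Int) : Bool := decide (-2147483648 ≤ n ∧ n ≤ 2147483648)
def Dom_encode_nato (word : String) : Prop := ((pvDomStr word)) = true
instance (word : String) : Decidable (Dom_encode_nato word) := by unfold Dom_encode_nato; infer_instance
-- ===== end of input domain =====

-- B replaces A's suffix-re-uppercasing recursion with one iterative pass (uppercase once,
-- accumulate parts, join) over a 26-entry tuple indexed by ord(c)-65 instead of the dict.

-- ===== PORT A =====
def natoData : PySem.Dict Char (List Char) := PySem.Dict.mk
  [('A', "Alpha".toList), ('B', "Bravo".toList), ('C', "Charlie".toList), ('D', "Delta".toList),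
   ('E', "Echo".toList), ('F', "Foxtrot".toList), ('G', "Golf".toList), ('H', "Hotel".toList),
   ('I', "India".toList), ('J', "juliet".toList), ('K', "Kilo".toList), ('L', "Lima".toList),
   ('M', "Mike".toList), ('N', "November".toList), ('O', "Oscar".toList), ('P', "Papa".toList),
   ('Q', "Quebec".toList), ('R', "Romeo".toList), ('S', "Sierra".toList), ('T', "Tango".toList),
   ('U', "Uniform".toList), ('V', "Victor".toList), ('W', "Whiskey".toList), ('X', "Xray".toList),
   ('Y', "Yankee".toList), ('Z', "Zulu".toList)]

-- A's recursion: empty → "", else uppercase, split off word[0] (= upperChar c, and the uppercased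
-- tail upper cs is what A recurses on), skip non-alpha, else data[char] + ' ' + recursion.
-- On Dom (ASCII) the uppercased alpha char is always a key of data, so getD's default is unreachable.
def encodeNatoGo : List Char → List Char
  | [] => []
  | c :: cs =>
    let char := PySem.Chars.upperChar c
    let rest := PySem.Chars.upper cs
    if !(PySem.Chars.isalpha char) then encodeNatoGo rest
    else natoData.getD char [] ++ [' '] ++ encodeNatoGo rest
termination_by l => l.length
decreasing_by all_goals simp [PySem.Chars.upper]

def encode_nato (word : String) : String := String.ofList (encodeNatoGo word.toList)

-- ===== PORT B =====
-- the NATO tuple of Source B; NATO[ord(c)-65] is natoWords.getD (c.toNat - 65) [] — on Dom the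
-- index is always in range (uppercased ASCII alpha), so getD's default is unreachable.
def natoWords : List (List Char) :=
  ["Alpha".toList, "Bravo".toList, "Charlie".toList, "Delta".toList, "Echo".toList,
   "Foxtrot".toList, "Golf".toList, "Hotel".toList, "India".toList, "juliet".toList,
   "Kilo".toList, "Lima".toList, "Mike".toList, "November".toList, "Oscar".toList,
   "Papa".toList, "Quebec".toList, "Romeo".toList, "Sierra".toList, "Tango".toList,
   "Uniform".toList, "Victor".toList, "Whiskey".toList, "Xray".toList, "Yankee".toList,
   "Zulu".toList]

-- Source B's loop 'for c in word.upper(): if c.isalpha(): parts.append(NATO[ord(c)-65] + " ")'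
-- followed by ''.join(parts), as a foldl over the uppercased character list.
def encode_nato_alt (word : String) : String :=
  String.ofList (PySem.Chars.join []
    ((PySem.Chars.upper word.toList).foldl
      (fun parts c =>
        if PySem.Chars.isalpha c then parts ++ [natoWords.getD (c.toNat - 65) [] ++ [' ']]
        else parts)
      []))

-- ===== PRECONDITION & SPEC =====
def Spec_encode_nato (word : String) (out : String) : Prop := out = encode_nato_alt word
instance (word : String) (out : String) : Decidable (Spec_encode_nato word out) := by unfold Spec_encode_nato; infer_instance

-- ===== CLAIM (what is proved, stated in full; the proofs are below) =====
def Claim_equal_encode_nato : Prop := ∀ (word : String), Dom_encode_nato word → Spec_encode_nato word (encode_nato word)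

-- ===== LEMMAS AND PROOFS =====
theorem upc_idem (c : Char) : PySem.Chars.upperChar (PySem.Chars.upperChar c) = PySem.Chars.upperChar c := by
  simp only [PySem.Chars.upperChar, PySem.Chars.islower]
  split_ifs with h1 h2 <;> try rfl
  exfalso
  simp only [Bool.and_eq_true, decide_eq_true_eq, Char.le_def, UInt32.le_iff_toNat_le, Char.toNat] at h1 h2
  have ha : 'a'.val.toNat = 97 := rfl
  have hz : 'z'.val.toNat = 122 := rfl
  have hval : Nat.isValidChar (c.val.toNat - 32) := by
    left; show _ < 55296; omega
  rw [show (Char.ofNat (c.val.toNat - 32)).val.toNat = c.val.toNat - 32 from by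
    rw [show (Char.ofNat (c.val.toNat - 32)).val.toNat = (Char.ofNat (c.val.toNat - 32)).toNat from rfl,
      Char.toNat_ofNat, if_pos hval]] at h2
  omega

theorem upper_idem (l : List Char) : PySem.Chars.upper (PySem.Chars.upper l) = PySem.Chars.upper l := by
  simp [PySem.Chars.upper, List.map_map, Function.comp_def, upc_idem]

theorem join_nil_flatten (parts : List (List Char)) : PySem.Chars.join [] parts = parts.flatten := by
  induction parts with
  | nil => rfl
  | cons p ps ih =>
    cases ps with
    | nil => rfl
    | cons q r =>
      simp only [PySem.Chars.join, List.intercalate, List.intersperse_cons₂,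
        List.flatten_cons] at ih ⊢
      simp [ih]

-- A characterisation of A's recursion as flatten-of-map-of-filter over the uppercased list.
theorem encodeNatoGo_eq (l : List Char) :
    encodeNatoGo l =
      (((PySem.Chars.upper l).filter PySem.Chars.isalpha).map
        (fun c => natoData.getD c [] ++ [' '])).flatten := by
  induction hn : l.length using Nat.strong_induction_on generalizing l with
  | _ n ih =>
    match l with
    | [] => simp [encodeNatoGo, PySem.Chars.upper]
    | c :: cs =>
      rw [encodeNatoGo]
      have hlen : (PySem.Chars.upper cs).length = cs.length := by simp [PySem.Chars.upper]
      have hrec := ih cs.length (by subst hn; simp) (PySem.Chars.upper cs) (by rw [hlen])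
      rw [upper_idem] at hrec
      simp only [PySem.Chars.upper, List.map_cons, List.filter_cons]
      by_cases h : PySem.Chars.isalpha (PySem.Chars.upperChar c) <;>
        · simp [h]
          simpa [PySem.Chars.upper] using hrec

-- An alphabetic character in the uppercased list is an uppercase ASCII letter.
theorem alpha_upper_range (c : Char) (h : PySem.Chars.isalpha (PySem.Chars.upperChar c) = true) :
    65 ≤ (PySem.Chars.upperChar c).toNat ∧ (PySem.Chars.upperChar c).toNat ≤ 90 := by
  have hct : c.toNat = c.val.toNat := rfl
  by_cases h1 : (decide ('a' ≤ c) && decide (c ≤ 'z')) = true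
  · simp only [PySem.Chars.upperChar, PySem.Chars.islower, h1, if_true]
    simp only [Bool.and_eq_true, decide_eq_true_eq, Char.le_def, UInt32.le_iff_toNat_le] at h1
    have ha : 'a'.val.toNat = 97 := rfl
    have hz : 'z'.val.toNat = 122 := rfl
    have hval : Nat.isValidChar (c.toNat - 32) := by left; show _ < 55296; omega
    rw [show (Char.ofNat (c.toNat - 32)).toNat = c.toNat - 32 from by
      rw [Char.toNat_ofNat, if_pos hval]]
    omega
  · simp only [PySem.Chars.upperChar, PySem.Chars.islower] at h ⊢
    rw [if_neg h1] at h ⊢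
    simp only [PySem.Chars.isalpha, PySem.Chars.isupper, PySem.Chars.islower,
      Bool.or_eq_true, Bool.and_eq_true, decide_eq_true_eq, Char.le_def,
      UInt32.le_iff_toNat_le] at h h1
    have hA : 'A'.val.toNat = 65 := rfl
    have hZ : 'Z'.val.toNat = 90 := rfl
    have ha : 'a'.val.toNat = 97 := rfl
    have hz : 'z'.val.toNat = 122 := rfl
    omega

-- On uppercase ASCII letters the dict lookup and the tuple lookup agree.
theorem data_eq_words (c : Char) (h1 : 65 ≤ c.toNat) (h2 : c.toNat ≤ 90) :
    natoData.getD c [] = natoWords.getD (c.toNat - 65) [] := by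
  rw [← Char.ofNat_toNat c]
  have hv : Nat.isValidChar c.toNat := c.valid
  generalize hn : c.toNat = n at h1 h2
  have hval : (Char.ofNat n).toNat = n := by rw [Char.toNat_ofNat, if_pos (hn ▸ hv)]
  rw [hval]
  interval_cases n <;> decide

-- ===== VERDICT (by name: the statement is the Claim_ definition above) =====
theorem encode_nato_spec : Claim_equal_encode_nato := by
  intro word _
  unfold Spec_encode_nato
  rw [encode_nato, encode_nato_alt, encodeNatoGo_eq, PySem.List.foldl_append_if,
    List.nil_append, join_nil_flatten]
  apply congrArg String.ofList
  apply congrArg List.flatten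
  apply List.map_congr_left
  intro c hc
  rw [List.mem_filter] at hc
  obtain ⟨hmem, halpha⟩ := hc
  simp only [PySem.Chars.upper, List.mem_map] at hmem
  obtain ⟨d, _, rfl⟩ := hmem
  obtain ⟨h1, h2⟩ := alpha_upper_range d halpha
  rw [data_eq_words _ h1 h2]
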